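-- pv_equiv track=rewrite | github.com/AlexLee2014/ISC_32A_labproj1 | lab projects/proj_1/project1.py | lexicographical_sort
-- ===== SOURCE A (Python) =====
-- def lexicographical_sort(directory : str, inputfiles : [], slashtype : str) -> []:
--     """Return a list of files sorted lexicographically, with files in the base directory in the beginning.
--
--     Keyword arguments:
--     directory -- the base directory
--     inputfiles -- the files to sort
--     slashtype -- the type of slash that is used to separate directories
--     """
--     outputfiles = []
--     directfiles = []
--     subfiles = []
--     for file in inputfiles:
--         if slashtype in file[directory.__len__()+1:]:
--             subfiles.append(file)
--         else:
--             directfiles.append(file)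
--     outputfiles.extend(sorted(directfiles))
--     outputfiles.extend(sorted(subfiles))
--     return outputfiles
-- ===== SOURCE B (Python) =====
-- def lexicographical_sort(directory : str, inputfiles : [], slashtype : str) -> []:
--     """One sort with a composite key: subdirectory files compare after base-directory files."""
--     return sorted(inputfiles, key=lambda f: (slashtype in f[len(directory)+1:], f))
-- ===== Notes on version B (the rewrite author's own statement) =====
-- stated objective: idiomatic
-- what changed: B performs a single sort of the whole list under the composite key (is-subdirectory-file, filename) with False ordering before True, eliminating A's partition loop, the two separate sorts and the concatenation.
import Mathlib
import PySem

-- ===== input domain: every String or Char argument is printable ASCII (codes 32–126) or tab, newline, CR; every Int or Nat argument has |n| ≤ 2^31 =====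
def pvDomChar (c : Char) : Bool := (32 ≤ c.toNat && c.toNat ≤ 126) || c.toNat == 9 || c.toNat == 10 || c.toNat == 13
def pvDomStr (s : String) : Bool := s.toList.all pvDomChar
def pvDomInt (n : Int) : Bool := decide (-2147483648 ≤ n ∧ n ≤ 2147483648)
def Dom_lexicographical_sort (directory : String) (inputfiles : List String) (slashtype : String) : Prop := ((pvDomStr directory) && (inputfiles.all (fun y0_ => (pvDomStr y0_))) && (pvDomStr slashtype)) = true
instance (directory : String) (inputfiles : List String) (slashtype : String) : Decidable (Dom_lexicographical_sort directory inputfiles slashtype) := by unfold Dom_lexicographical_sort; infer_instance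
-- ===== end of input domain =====

-- B replaces A's partition loop + two sorts + concatenation by a single sort under the
-- composite key (is-subdirectory-file, filename) (objective: idiomatic one-keyed-sort).

-- shared predicate: `slashtype in file[len(directory)+1:]`
def pvInSub (directory : String) (slashtype : String) (file : String) : Bool :=
  PySem.Str.isIn slashtype (PySem.Str.slice file (some (PySem.Str.len directory + 1)) none)

-- ===== PORT A =====
def lexicographical_sort (directory : String) (inputfiles : List String) (slashtype : String) : List String :=
  -- outputfiles = []; directfiles = []; subfiles = []; for file in inputfiles: …
  let groups : List String × List String :=
    inputfiles.foldl
      (fun acc file =>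
        if pvInSub directory slashtype file then (acc.1, acc.2 ++ [file])
        else (acc.1 ++ [file], acc.2))
      ([], [])
  -- outputfiles.extend(sorted(directfiles)); outputfiles.extend(sorted(subfiles))
  PySem.List.sorted groups.1 (fun x => x) ++ PySem.List.sorted groups.2 (fun x => x)

-- ===== PORT B =====
def lexicographical_sort_alt (directory : String) (inputfiles : List String) (slashtype : String) : List String :=
  -- sorted(inputfiles, key=lambda f: (slashtype in f[len(directory)+1:], f))
  PySem.List.sorted2 inputfiles (pvInSub directory slashtype) (fun f => f)

-- ===== PRECONDITION & SPEC =====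
def Spec_lexicographical_sort (directory : String) (inputfiles : List String) (slashtype : String) (out : List String) : Prop := out = lexicographical_sort_alt directory inputfiles slashtype
instance (directory : String) (inputfiles : List String) (slashtype : String) (out : List String) : Decidable (Spec_lexicographical_sort directory inputfiles slashtype out) := by unfold Spec_lexicographical_sort; infer_instance

-- ===== CLAIM (what is proved, stated in full; the proofs are below) =====
def Claim_equal_lexicographical_sort : Prop := ∀ (directory : String) (inputfiles : List String) (slashtype : String), Dom_lexicographical_sort directory inputfiles slashtype → Spec_lexicographical_sort directory inputfiles slashtype (lexicographical_sort directory inputfiles slashtype)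

-- ===== LEMMAS AND PROOFS =====

-- abbreviations for the two insertion comparators (proof-local)
def pvLtS (a b : String) : Bool := decide (a < b)
def pvLt2 (p : String → Bool) (a b : String) : Bool :=
  decide (p a < p b) || !decide (p b < p a) && decide (a < b)

-- A's single loop with two accumulators is the pair of filters.
theorem loopA_eq_filters (p : String → Bool) (xs : List String) (a b : List String) :
    xs.foldl
      (fun (acc : List String × List String) file =>
        if p file then (acc.1, acc.2 ++ [file]) else (acc.1 ++ [file], acc.2))
      (a, b)
    = (a ++ xs.filter (fun f => !(p f)), b ++ xs.filter p) := by
  induction xs generalizing a b with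
  | nil => simp
  | cons x xs ih =>
    by_cases h : p x = true <;> simp [List.foldl_cons, h, ih]

-- inserting a direct file into (direct ++ sub) inserts it within the direct block
theorem insert2_false (p : String → Bool) (x : String) (F T : List String)
    (hx : p x = false) (hF : ∀ y ∈ F, p y = false) (hT : ∀ y ∈ T, p y = true) :
    PySem.List.insertBy (pvLt2 p) x (F ++ T)
      = PySem.List.insertBy pvLtS x F ++ T := by
  induction F with
  | nil =>
    cases T with
    | nil => simp [PySem.List.insertBy]
    | cons t ts =>
      have ht : p t = true := hT t (by simp)
      simp [PySem.List.insertBy, pvLt2, hx, ht]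
  | cons f F ih =>
    have hf : p f = false := hF f (by simp)
    have hF' : ∀ y ∈ F, p y = false := fun y hy => hF y (by simp [hy])
    by_cases hlt : x < f
    · simp [PySem.List.insertBy, pvLt2, pvLtS, hx, hf, hlt]
    · simp [PySem.List.insertBy, pvLt2, pvLtS, hx, hf, hlt, ih hF']

-- inserting a subdirectory file into (direct ++ sub) inserts it within the sub block
theorem insert2_true (p : String → Bool) (x : String) (F T : List String)
    (hx : p x = true) (hF : ∀ y ∈ F, p y = false) (hT : ∀ y ∈ T, p y = true) :
    PySem.List.insertBy (pvLt2 p) x (F ++ T)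
      = F ++ PySem.List.insertBy pvLtS x T := by
  induction F with
  | nil =>
    induction T with
    | nil => simp [PySem.List.insertBy]
    | cons t ts iht =>
      have ht : p t = true := hT t (by simp)
      have hts : ∀ y ∈ ts, p y = true := fun y hy => hT y (by simp [hy])
      by_cases hlt : x < t
      · simp [PySem.List.insertBy, pvLt2, pvLtS, hx, ht, hlt]
      · simpa [PySem.List.insertBy, pvLt2, pvLtS, hx, ht, hlt] using iht hts
  | cons f F ih =>
    have hf : p f = false := hF f (by simp)
    have hF' : ∀ y ∈ F, p y = false := fun y hy => hF y (by simp [hy])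
    simp [PySem.List.insertBy, pvLt2, hx, hf, ih hF']

-- the composite-key insertion fold splits into the two plain insertion folds
theorem fold2_split (p : String → Bool) (xs : List String) (F T : List String)
    (hF : ∀ y ∈ F, p y = false) (hT : ∀ y ∈ T, p y = true) :
    xs.foldl (fun acc x => PySem.List.insertBy (pvLt2 p) x acc) (F ++ T)
      = (xs.filter (fun f => !(p f))).foldl (fun acc x => PySem.List.insertBy pvLtS x acc) F
        ++ (xs.filter p).foldl (fun acc x => PySem.List.insertBy pvLtS x acc) T := by
  induction xs generalizing F T with
  | nil => simp
  | cons x xs ih =>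
    by_cases hx : p x = true
    · have hT' : ∀ y ∈ PySem.List.insertBy pvLtS x T, p y = true := by
        intro y hy
        rcases (PySem.List.mem_insertBy pvLtS x y T).mp hy with rfl | hy'
        · exact hx
        · exact hT y hy'
      simp only [List.foldl_cons, List.filter_cons, hx, if_true,
        insert2_true p x F T hx hF hT]
      exact ih F _ hF hT'
    · have hx' : p x = false := by simpa using hx
      have hF' : ∀ y ∈ PySem.List.insertBy pvLtS x F, p y = false := by
        intro y hy
        rcases (PySem.List.mem_insertBy pvLtS x y F).mp hy with rfl | hy'
        · exact hx'
        · exact hF y hy'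
      simp only [List.foldl_cons, List.filter_cons, hx, Bool.false_eq_true, if_false,
        insert2_false p x F T hx' hF hT]
      exact ih _ T hF' hT

-- ===== VERDICT (by name: the statement is the Claim_ definition above) =====
theorem lexicographical_sort_spec : Claim_equal_lexicographical_sort := by
  intro directory inputfiles slashtype _
  show _ = _
  unfold lexicographical_sort lexicographical_sort_alt
  rw [loopA_eq_filters]
  dsimp only
  rw [PySem.List.sorted_eq_foldl_insertBy, PySem.List.sorted_eq_foldl_insertBy]
  have h := fold2_split (pvInSub directory slashtype) inputfiles [] []
    (by simp) (by simp)
  simp only [List.nil_append] at h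
  simp only [PySem.List.sorted2, if_neg (by simp : ¬ (false = true))] at h ⊢
  exact h.symm
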